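-- pv_equiv track=rewrite | github.com/klaveflo/Airquality_Dashboard | shiny_test.py | render_legend
-- ===== SOURCE A (Python) =====
-- EAQI_THRESHOLDS = {
--     "PM2.5": [(5, "Good", "#4477AA"), (15, "Fair", "#77AADD"), (50, "Moderate", "#DDCC77"),
--               (90, "Poor", "#EE7733"), (140, "Very poor", "#CC3311"), (float("inf"), "Extremely poor", "#882255")],
--     "PM10":  [(15, "Good", "#4477AA"), (45, "Fair", "#77AADD"), (120, "Moderate", "#DDCC77"),
--               (195, "Poor", "#EE7733"), (270, "Very poor", "#CC3311"), (float("inf"), "Extremely poor", "#882255")],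
--     "NO2":   [(10, "Good", "#4477AA"), (25, "Fair", "#77AADD"), (60, "Moderate", "#DDCC77"),
--               (100, "Poor", "#EE7733"), (150, "Very poor", "#CC3311"), (float("inf"), "Extremely poor", "#882255")],
--     "O3":    [(60, "Good", "#4477AA"), (100, "Fair", "#77AADD"), (120, "Moderate", "#DDCC77"),
--               (160, "Poor", "#EE7733"), (180, "Very poor", "#CC3311"), (float("inf"), "Extremely poor", "#882255")],
-- }
--
-- def render_legend(pollutant):
--     thresholds = EAQI_THRESHOLDS.get(pollutant, EAQI_THRESHOLDS["PM10"])
--     prev, swatches = 0, []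
--     for upper, label, colour in thresholds:
--         rng = f"{prev}–{upper}" if upper != float("inf") else f"{prev}+"
--         swatches.append(
--             f'<span style="background:{colour};color:#111;padding:2px 8px;'
--             f'border-radius:3px;font-size:11px;white-space:nowrap">'
--             f'{label}&nbsp;<span style="font-size:10px">{rng}</span></span>'
--         )
--         prev = upper if upper != float("inf") else prev
--     return (
--         '<div style="margin-top:8px;font-size:12px;color:#ccc;line-height:2.2">'
--         f'<b>{pollutant} Air Quality Index (µg/m³)</b><br>'
--         + " &thinsp;".join(swatches)
--         + '<br><span style="color:#aaa;font-size:11px;margin-top:6px;display:block">'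
--         + '<b>Station types:</b> ● Large (urban) • ◯ Medium + ring (suburban) • ◯ Small + thick ring (rural)</span>'
--         + "</div>"
--     )
-- ===== SOURCE B (Python) =====
-- EAQI_THRESHOLDS = {
--     "PM2.5": [(5, "Good", "#4477AA"), (15, "Fair", "#77AADD"), (50, "Moderate", "#DDCC77"),
--               (90, "Poor", "#EE7733"), (140, "Very poor", "#CC3311"), (float("inf"), "Extremely poor", "#882255")],
--     "PM10":  [(15, "Good", "#4477AA"), (45, "Fair", "#77AADD"), (120, "Moderate", "#DDCC77"),
--               (195, "Poor", "#EE7733"), (270, "Very poor", "#CC3311"), (float("inf"), "Extremely poor", "#882255")],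
--     "NO2":   [(10, "Good", "#4477AA"), (25, "Fair", "#77AADD"), (60, "Moderate", "#DDCC77"),
--               (100, "Poor", "#EE7733"), (150, "Very poor", "#CC3311"), (float("inf"), "Extremely poor", "#882255")],
--     "O3":    [(60, "Good", "#4477AA"), (100, "Fair", "#77AADD"), (120, "Moderate", "#DDCC77"),
--               (160, "Poor", "#EE7733"), (180, "Very poor", "#CC3311"), (float("inf"), "Extremely poor", "#882255")],
-- }
--
-- def _swatch(lower, upper, label, colour):
--     rng = f"{lower}+" if upper == float("inf") else f"{lower}–{upper}"
--     return (
--         f'<span style="background:{colour};color:#111;padding:2px 8px;'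
--         f'border-radius:3px;font-size:11px;white-space:nowrap">'
--         f'{label}&nbsp;<span style="font-size:10px">{rng}</span></span>'
--     )
--
-- def render_legend(pollutant):
--     thresholds = EAQI_THRESHOLDS.get(pollutant, EAQI_THRESHOLDS["PM10"])
--     lowers = [0] + [u for (u, _, _) in thresholds[:-1]]
--     swatches = [_swatch(lo, up, lab, col)
--                 for lo, (up, lab, col) in zip(lowers, thresholds)]
--     return (
--         '<div style="margin-top:8px;font-size:12px;color:#ccc;line-height:2.2">'
--         f'<b>{pollutant} Air Quality Index (µg/m³)</b><br>'
--         + " &thinsp;".join(swatches)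
--         + '<br><span style="color:#aaa;font-size:11px;margin-top:6px;display:block">'
--         + '<b>Station types:</b> ● Large (urban) • ◯ Medium + ring (suburban) • ◯ Small + thick ring (rural)</span>'
--         + "</div>"
--     )
-- ===== Notes on version B (the rewrite author's own statement) =====
-- stated objective: simpler
-- what changed: Replaces A's mutable prev accumulator threaded through the loop with a precomputed lower-bound list zipped against the thresholds, mapping each (lower,upper,label,colour) tuple directly to its swatch via a helper.
import Mathlib
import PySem

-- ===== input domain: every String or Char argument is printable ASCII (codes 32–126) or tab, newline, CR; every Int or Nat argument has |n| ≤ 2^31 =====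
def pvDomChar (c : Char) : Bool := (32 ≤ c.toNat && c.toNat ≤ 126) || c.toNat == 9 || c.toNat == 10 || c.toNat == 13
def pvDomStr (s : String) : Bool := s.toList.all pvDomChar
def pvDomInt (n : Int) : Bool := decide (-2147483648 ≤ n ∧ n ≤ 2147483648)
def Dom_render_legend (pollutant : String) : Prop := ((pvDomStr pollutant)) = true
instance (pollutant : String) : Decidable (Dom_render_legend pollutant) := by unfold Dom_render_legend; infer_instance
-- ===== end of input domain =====

-- B builds each swatch directly from a precomputed lower-bound list zipped with the
-- thresholds, instead of A's accumulator threading `prev` through the loop (objective: simpler).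

-- Shared module constant: upper bound is Option Int, `none` = float("inf").
def EAQI_THRESHOLDS : PySem.Dict String (List (Option Int × String × String)) :=
  PySem.Dict.mk [("PM2.5", [(some 5, "Good", "#4477AA"), (some 15, "Fair", "#77AADD"), (some 50, "Moderate", "#DDCC77"),
              (some 90, "Poor", "#EE7733"), (some 140, "Very poor", "#CC3311"), (none, "Extremely poor", "#882255")]),
   ("PM10",  [(some 15, "Good", "#4477AA"), (some 45, "Fair", "#77AADD"), (some 120, "Moderate", "#DDCC77"),
              (some 195, "Poor", "#EE7733"), (some 270, "Very poor", "#CC3311"), (none, "Extremely poor", "#882255")]),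
   ("NO2",   [(some 10, "Good", "#4477AA"), (some 25, "Fair", "#77AADD"), (some 60, "Moderate", "#DDCC77"),
              (some 100, "Poor", "#EE7733"), (some 150, "Very poor", "#CC3311"), (none, "Extremely poor", "#882255")]),
   ("O3",    [(some 60, "Good", "#4477AA"), (some 100, "Fair", "#77AADD"), (some 120, "Moderate", "#DDCC77"),
              (some 160, "Poor", "#EE7733"), (some 180, "Very poor", "#CC3311"), (none, "Extremely poor", "#882255")])]

def pm10Default : List (Option Int × String × String) :=
  [(some 15, "Good", "#4477AA"), (some 45, "Fair", "#77AADD"), (some 120, "Moderate", "#DDCC77"),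
   (some 195, "Poor", "#EE7733"), (some 270, "Very poor", "#CC3311"), (none, "Extremely poor", "#882255")]

-- ===== PORT A =====
-- A's loop: thread (prev, swatches) through the threshold list.
def renderLoopA (prev : Int) (swatches : List String) :
    List (Option Int × String × String) → Int × List String
  | [] => (prev, swatches)
  | (upper, label, colour) :: rest =>
      let rng := match upper with
        | some u => PySem.Int.toStr prev ++ "–" ++ PySem.Int.toStr u
        | none => PySem.Int.toStr prev ++ "+"
      let sw := "<span style=\"background:" ++ colour ++ ";color:#111;padding:2px 8px;" ++
        "border-radius:3px;font-size:11px;white-space:nowrap\">" ++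
        label ++ "&nbsp;<span style=\"font-size:10px\">" ++ rng ++ "</span></span>"
      renderLoopA (match upper with | some u => u | none => prev) (swatches ++ [sw]) rest

def render_legend (pollutant : String) : String :=
  let thresholds := PySem.Dict.getD EAQI_THRESHOLDS pollutant pm10Default
  let res := renderLoopA 0 [] thresholds
  "<div style=\"margin-top:8px;font-size:12px;color:#ccc;line-height:2.2\">" ++
  "<b>" ++ pollutant ++ " Air Quality Index (µg/m³)</b><br>" ++
  PySem.Str.join " &thinsp;" res.2 ++
  "<br><span style=\"color:#aaa;font-size:11px;margin-top:6px;display:block\">" ++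
  "<b>Station types:</b> ● Large (urban) • ◯ Medium + ring (suburban) • ◯ Small + thick ring (rural)</span>" ++
  "</div>"

-- ===== PORT B =====
def swatchB (lower : Int) (upper : Option Int) (label colour : String) : String :=
  let rng := match upper with
    | none => PySem.Int.toStr lower ++ "+"
    | some u => PySem.Int.toStr lower ++ "–" ++ PySem.Int.toStr u
  "<span style=\"background:" ++ colour ++ ";color:#111;padding:2px 8px;" ++
  "border-radius:3px;font-size:11px;white-space:nowrap\">" ++
  label ++ "&nbsp;<span style=\"font-size:10px\">" ++ rng ++ "</span></span>"

def render_legend_alt (pollutant : String) : String :=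
  let thresholds := PySem.Dict.getD EAQI_THRESHOLDS pollutant pm10Default
  let lowers : List Int := 0 :: (PySem.List.slice thresholds none (some (-1))).map (fun t => t.1.getD 0)
  -- note: in Source B the lowers list holds the (always finite) uppers of thresholds[:-1]; `.getD 0` is only the Option unwrap
  let swatches := (lowers.zip thresholds).map (fun p => swatchB p.1 p.2.1 p.2.2.1 p.2.2.2)
  "<div style=\"margin-top:8px;font-size:12px;color:#ccc;line-height:2.2\">" ++
  "<b>" ++ pollutant ++ " Air Quality Index (µg/m³)</b><br>" ++
  PySem.Str.join " &thinsp;" swatches ++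
  "<br><span style=\"color:#aaa;font-size:11px;margin-top:6px;display:block\">" ++
  "<b>Station types:</b> ● Large (urban) • ◯ Medium + ring (suburban) • ◯ Small + thick ring (rural)</span>" ++
  "</div>"

-- ===== PRECONDITION & SPEC =====
def Spec_render_legend (pollutant : String) (out : String) : Prop := out = render_legend_alt pollutant
instance (pollutant : String) (out : String) : Decidable (Spec_render_legend pollutant out) := by unfold Spec_render_legend; infer_instance

-- ===== CLAIM (what is proved, stated in full; the proofs are below) =====
def Claim_equal_render_legend : Prop := ∀ (pollutant : String), Dom_render_legend pollutant → Spec_render_legend pollutant (render_legend pollutant)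

-- ===== LEMMAS AND PROOFS =====

-- The selected threshold list is always one of the four table rows.
lemma sel_cases (p : String) :
    PySem.Dict.getD EAQI_THRESHOLDS p pm10Default ∈ (EAQI_THRESHOLDS.values ++ [pm10Default]) := by
  unfold PySem.Dict.getD PySem.Dict.get?
  cases h : List.find? (fun q => q.1 == p) EAQI_THRESHOLDS.items with
  | none => simp
  | some kv =>
      have hm := List.mem_of_find?_eq_some h
      have : kv.2 ∈ EAQI_THRESHOLDS.values := by
        simp [PySem.Dict.values]
        exact ⟨kv.1, by simpa using hm⟩
      simp [this]

-- ===== VERDICT (by name: the statement is the Claim_ definition above) =====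
theorem render_legend_spec : Claim_equal_render_legend := by
  intro p _
  unfold Spec_render_legend render_legend render_legend_alt
  have h := sel_cases p
  revert h
  generalize PySem.Dict.getD EAQI_THRESHOLDS p pm10Default = ts
  intro h
  fin_cases h <;> rfl
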